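-- pv_equiv track=rewrite | github.com/kaku-highball-village-tree/tsucrea-manhour-alloc_11 | src/PL_CsvToTsv_Cmd_0002.py | build_pj_name_vertical_rows
-- ===== SOURCE A (Python) =====
-- from typing import Dict, List, Optional, Tuple
--
-- def build_pj_name_vertical_rows(objRows: List[List[str]]) -> List[List[str]]:
--     if not objRows:
--         return []
--
--     objHeaderRow: List[str] = objRows[0]
--     objItemRows: List[List[str]] = objRows[1:]
--
--     objVerticalRows: List[List[str]] = []
--     objVerticalHeader: List[str] = ["PJ名称"]
--     for objItemRow in objItemRows:
--         pszItemName: str = objItemRow[0] if len(objItemRow) > 0 else ""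
--         objVerticalHeader.append(pszItemName)
--     objVerticalRows.append(objVerticalHeader)
--
--     for iColumnIndex in range(1, len(objHeaderRow)):
--         pszProjectName: str = objHeaderRow[iColumnIndex]
--         objVerticalRow: List[str] = [pszProjectName]
--         for objItemRow in objItemRows:
--             pszValue: str = objItemRow[iColumnIndex] if len(objItemRow) > iColumnIndex else ""
--             objVerticalRow.append(pszValue)
--         objVerticalRows.append(objVerticalRow)
--
--     return objVerticalRows
-- ===== SOURCE B (Python) =====
-- def build_pj_name_vertical_rows(objRows):
--     if not objRows:
--         return []
--     objHeaderRow = objRows[0]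
--     # Width of the vertical table = number of output rows; at least 1 so the
--     # PJ-name header row exists even when the header row is empty.
--     iWidth = max(1, len(objHeaderRow))
--
--     def fit(row):
--         return (list(row) + [""] * iWidth)[:iWidth]
--
--     objMatrix = [fit(["PJ名称"] + objHeaderRow[1:])] + [fit(r) for r in objRows[1:]]
--     return [list(col) for col in zip(*objMatrix)]
-- ===== Notes on version B (the rewrite author's own statement) =====
-- stated objective: idiomatic
-- what changed: B first normalizes the input into a rectangular matrix (overwrite the header's first cell with 'PJ名称', pad/truncate every row to a fixed width) and then transposes it with a single zip(*matrix), replacing A's nested column-index loop with per-cell bounds checks.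
import Mathlib
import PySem

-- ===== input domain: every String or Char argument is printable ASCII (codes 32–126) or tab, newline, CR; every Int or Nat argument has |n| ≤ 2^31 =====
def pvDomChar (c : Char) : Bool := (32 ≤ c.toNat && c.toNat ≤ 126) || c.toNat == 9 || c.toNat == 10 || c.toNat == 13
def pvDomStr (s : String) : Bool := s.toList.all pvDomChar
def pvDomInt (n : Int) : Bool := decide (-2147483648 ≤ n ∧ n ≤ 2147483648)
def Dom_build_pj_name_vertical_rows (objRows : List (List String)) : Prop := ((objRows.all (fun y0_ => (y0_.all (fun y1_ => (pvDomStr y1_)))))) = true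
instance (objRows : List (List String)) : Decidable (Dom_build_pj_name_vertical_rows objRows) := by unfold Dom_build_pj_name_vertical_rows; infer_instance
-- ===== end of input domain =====

-- B normalizes the input into a rectangular matrix and transposes it with one zip(*...),
-- replacing A's nested column-index loop with per-cell bounds checks (objective: idiomatic).

-- ===== PORT A =====
def build_pj_name_vertical_rows (objRows : List (List String)) : List (List String) :=
  match objRows with
  | [] => []
  | objHeaderRow :: objItemRows =>
    -- first loop: objVerticalHeader.append(objItemRow[0] if len(objItemRow) > 0 else "")
    let objVerticalHeader : List String :=
      objItemRows.foldl
        (fun acc r => acc ++ [if (r.length : Int) > 0 then PySem.List.pyGetD r 0 "" else ""])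
        ["PJ名称"]
    let objVerticalRows : List (List String) := [objVerticalHeader]
    -- second loop: for iColumnIndex in range(1, len(objHeaderRow))
    (PySem.List.pyRange 1 (objHeaderRow.length : Int) 1).foldl
      (fun acc i =>
        let pszProjectName := PySem.List.pyGetD objHeaderRow i ""   -- always in range: 1 ≤ i < len
        let objVerticalRow : List String :=
          objItemRows.foldl
            (fun acc2 r => acc2 ++ [if (r.length : Int) > i then PySem.List.pyGetD r i "" else ""])
            [pszProjectName]
        acc ++ [objVerticalRow])
      objVerticalRows

-- ===== PORT B =====
-- (list(row) + [""] * w)[:w]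
def pvFit (w : Nat) (row : List String) : List String :=
  (row ++ List.replicate w "").take w

-- zip(*matrix) followed by list(...) on each tuple: exact here because every row of the
-- matrix passed to it has the first row's length, so zip's truncation to the shortest row
-- is truncation to the first row's length and no getD default is ever taken.
def pvZipStar (matrix : List (List String)) : List (List String) :=
  match matrix with
  | [] => []
  | r :: _ => (List.range r.length).map (fun j => matrix.map (fun row => row.getD j ""))

def build_pj_name_vertical_rows_alt (objRows : List (List String)) : List (List String) :=
  match objRows with
  | [] => []
  | objHeaderRow :: objItemRows =>
    let iWidth := max 1 objHeaderRow.length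
    let objMatrix :=
      pvFit iWidth ("PJ名称" :: objHeaderRow.drop 1) :: objItemRows.map (pvFit iWidth)
    pvZipStar objMatrix

-- ===== PRECONDITION & SPEC =====
def Spec_build_pj_name_vertical_rows (objRows : List (List String)) (out : List (List String)) : Prop := out = build_pj_name_vertical_rows_alt objRows
instance (objRows : List (List String)) (out : List (List String)) : Decidable (Spec_build_pj_name_vertical_rows objRows out) := by unfold Spec_build_pj_name_vertical_rows; infer_instance

-- ===== CLAIM (what is proved, stated in full; the proofs are below) =====
def Claim_equal_build_pj_name_vertical_rows : Prop := ∀ (objRows : List (List String)), Dom_build_pj_name_vertical_rows objRows → Spec_build_pj_name_vertical_rows objRows (build_pj_name_vertical_rows objRows)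

-- ===== LEMMAS AND PROOFS =====

theorem pvFit_length (w : Nat) (row : List String) : (pvFit w row).length = w := by
  simp [pvFit]

-- padding/truncating to width w and then indexing below w = the bounds-checked access A makes
theorem pvFit_getD (w j : Nat) (row : List String) (hj : j < w) :
    (pvFit w row).getD j "" = if j < row.length then row.getD j "" else "" := by
  unfold pvFit
  rw [List.getD_eq_getElem?_getD, List.getElem?_take_of_lt hj]
  by_cases h : j < row.length
  · simp [List.getElem?_append_left h, h, List.getD_eq_getElem?_getD]
  · have : j - row.length < w := by omega
    simp [List.getElem?_append_right (by omega : row.length ≤ j), this, h]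

theorem pvConsEq (h : List String) (items : List (List String)) :
    build_pj_name_vertical_rows (h :: items) = build_pj_name_vertical_rows_alt (h :: items) := by
  simp only [build_pj_name_vertical_rows, build_pj_name_vertical_rows_alt, pvZipStar,
    PySem.List.foldl_append_singleton_eq_map, pvFit_length]
  rw [PySem.List.pyRange_one, show ((h.length : Int) - 1).toNat = h.length - 1 by omega,
    show max 1 h.length = (h.length - 1) + 1 by omega, List.range_succ_eq_map]
  simp only [List.map_map, List.map_cons, List.singleton_append]
  congr 1
  · -- row 0: the vertical header = column 0 of the normalized matrix
    congr 1
    -- head cell: (pvFit w ("PJ名称" :: _)).getD 0 "" = "PJ名称" holds definitionally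
    apply List.map_congr_left; intro r _
    simp only [Function.comp_apply]
    rw [pvFit_getD _ 0 r (by omega), PySem.List.pyGetD_zero]
    by_cases hr : 0 < r.length
    · rw [if_pos hr, if_pos (by exact_mod_cast hr)]
    · rw [if_neg hr, if_neg (by omega)]
  · -- row k+1: A's row for column index 1+k = column k+1 of the normalized matrix
    apply List.map_congr_left; intro k hk
    simp only [List.mem_range] at hk
    have hk1 : k + 1 < h.length := by omega
    simp only [Function.comp_apply, Nat.succ_eq_add_one]
    have hcast : (1 : Int) + (k : Int) = ((k + 1 : Nat) : Int) := by push_cast; ring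
    rw [hcast, PySem.List.pyGetD_natCast]
    have hlen : ("PJ名称" :: h.drop 1).length = h.length := by simp; omega
    congr 1
    · rw [pvFit_getD _ _ _ (by omega), hlen, if_pos hk1]
      show h.getD (k+1) "" = (h.drop 1).getD k ""
      simp [List.getD_eq_getElem?_getD]
    · apply List.map_congr_left; intro r _
      simp only [Function.comp_apply]
      rw [pvFit_getD _ _ _ (by omega)]
      by_cases hr : k + 1 < r.length
      · rw [if_pos (show (r.length : Int) > ((k+1 : Nat) : Int) by exact_mod_cast hr), if_pos hr,
          PySem.List.pyGetD_natCast]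
      · rw [if_neg (show ¬ (r.length : Int) > ((k+1 : Nat) : Int) by exact_mod_cast hr), if_neg hr]

-- ===== VERDICT (by name: the statement is the Claim_ definition above) =====
theorem build_pj_name_vertical_rows_spec : Claim_equal_build_pj_name_vertical_rows := by
  intro objRows _
  unfold Spec_build_pj_name_vertical_rows
  cases objRows with
  | nil => rfl
  | cons h items => exact pvConsEq h items
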